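-- pv_equiv track=rewrite | github.com/dyllanwli/Geocoding | main_utils.py | combine_labels
-- ===== SOURCE A (Python) =====
-- def combine_labels(labels):
--     result = []
--     i = 0
--     while i < len(labels):
--         label = labels[i]
--
--         if label.startswith("B-"):
--             result.append(label[2:])
--             i += 1
--             while i < len(labels) and labels[i].startswith("I-") and label[2:] == labels[i][2:]:
--                 i += 1
--         else:
--             result.append(label[2:])
--             i += 1
--     return result
-- ===== SOURCE B (Python) =====
-- def combine_labels(labels):
--     result = []
--     active = None
--     for label in labels:
--         if label.startswith("B-"):
--             base = label[2:]
--             result.append(base)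
--             active = base
--         elif label.startswith("I-") and label[2:] == active:
--             continue
--         else:
--             result.append(label[2:])
--             active = None
--     return result
-- ===== Notes on version B (the rewrite author's own statement) =====
-- stated objective: idiomatic
-- what changed: Replaced A's nested while loops sharing a manually advanced index (inner loop consuming matching I- tags after each B-) with a single flat for-loop state machine that carries an `active` base label and skips a matching I- tag via continue.
import Mathlib
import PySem

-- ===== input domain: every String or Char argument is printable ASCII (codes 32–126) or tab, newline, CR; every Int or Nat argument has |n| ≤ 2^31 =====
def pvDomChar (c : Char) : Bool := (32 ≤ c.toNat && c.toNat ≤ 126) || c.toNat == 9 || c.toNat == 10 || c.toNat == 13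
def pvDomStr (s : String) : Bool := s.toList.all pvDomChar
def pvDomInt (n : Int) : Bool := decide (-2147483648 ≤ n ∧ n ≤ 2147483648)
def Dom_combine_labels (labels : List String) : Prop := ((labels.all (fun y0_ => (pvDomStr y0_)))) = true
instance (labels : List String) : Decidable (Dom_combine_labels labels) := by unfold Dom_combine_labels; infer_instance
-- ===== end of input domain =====

-- B replaces A's nested while loops over a shared index with a single flat loop carrying an
-- `active` base label (objective: idiomatic; same O(n) cost; return value only, no mutation).

-- ===== PORT A =====
-- inner while: skip leading "I-" labels whose tail matches `base`
def pvSkipA (base : String) : List String → List String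
  | [] => []
  | x :: xs =>
    if PySem.Str.startswith x "I-" && base == PySem.Str.slice x (some 2) none then
      pvSkipA base xs
    else x :: xs

theorem pvSkipA_length_le (base : String) (xs : List String) :
    (pvSkipA base xs).length ≤ xs.length := by
  induction xs with
  | nil => simp [pvSkipA]
  | cons x xs ih =>
    simp only [pvSkipA]
    split
    · exact Nat.le_succ_of_le ih
    · simp

-- outer while over the remaining labels, `result` as accumulator
def pvLoopA (result : List String) : List String → List String
  | [] => result
  | label :: rest =>
    if PySem.Str.startswith label "B-" then
      pvLoopA (result ++ [PySem.Str.slice label (some 2) none])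
        (pvSkipA (PySem.Str.slice label (some 2) none) rest)
    else
      pvLoopA (result ++ [PySem.Str.slice label (some 2) none]) rest
  termination_by xs => xs.length
  decreasing_by
  · exact Nat.lt_succ_of_le (pvSkipA_length_le _ rest)
  · simp

def combine_labels (labels : List String) : List String := pvLoopA [] labels

-- ===== PORT B =====
-- one step of Source B's for-loop: state = (result, active)
def pvStepB (st : List String × Option String) (label : String) : List String × Option String :=
  if PySem.Str.startswith label "B-" then
    (st.1 ++ [PySem.Str.slice label (some 2) none], some (PySem.Str.slice label (some 2) none))
  else if PySem.Str.startswith label "I-" && st.2 == some (PySem.Str.slice label (some 2) none) then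
    st
  else
    (st.1 ++ [PySem.Str.slice label (some 2) none], none)

def combine_labels_alt (labels : List String) : List String :=
  (labels.foldl pvStepB (([] : List String), (none : Option String))).1

-- ===== PRECONDITION & SPEC =====
def Spec_combine_labels (labels : List String) (out : List String) : Prop := out = combine_labels_alt labels
instance (labels : List String) (out : List String) : Decidable (Spec_combine_labels labels out) := by unfold Spec_combine_labels; infer_instance

-- ===== CLAIM (what is proved, stated in full; the proofs are below) =====
def Claim_equal_combine_labels : Prop := ∀ (labels : List String), Dom_combine_labels labels → Spec_combine_labels labels (combine_labels labels)

-- ===== LEMMAS AND PROOFS =====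

-- with an active base, B's fold skips exactly the labels A's inner while skips
theorem foldl_stepB_some (base : String) (xs : List String) (acc : List String) :
    (List.foldl pvStepB (acc, some base) xs).1
      = (List.foldl pvStepB (acc, none) (pvSkipA base xs)).1 := by
  induction xs generalizing acc with
  | nil => simp [pvSkipA]
  | cons x xs ih =>
    by_cases hmatch :
        (PySem.Str.startswith x "I-" && base == PySem.Str.slice x (some 2) none) = true
    · have hm := hmatch
      simp only [Bool.and_eq_true, beq_iff_eq] at hm
      obtain ⟨hI, hb⟩ := hm
      have hB : PySem.Str.startswith x "B-" = false := by
        rw [Bool.eq_false_iff]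
        intro h
        rw [PySem.Str.startswith_eq, PySem.Chars.startswith_iff] at hI h
        obtain ⟨tI, hI⟩ := hI
        obtain ⟨tB, hB⟩ := h
        rw [← hB] at hI
        have := congrArg (fun l => l.head?) hI
        simp at this
      have hskip : pvSkipA base (x :: xs) = pvSkipA base xs := by
        simp only [pvSkipA, hmatch, if_true]
      have hstep : pvStepB (acc, some base) x = (acc, some base) := by
        simp only [pvStepB, hB]
        simp only [Bool.false_eq_true, if_false]
        have hc : (PySem.Str.startswith x "I-"
            && ((some base : Option String) == some (PySem.Str.slice x (some 2) none))) = true := by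
          simp only [Bool.and_eq_true, beq_iff_eq, Option.some.injEq]
          exact ⟨hI, hb⟩
        rw [if_pos hc]
      rw [hskip, List.foldl_cons, hstep, ih]
    · have hskip : pvSkipA base (x :: xs) = x :: xs := by
        simp only [pvSkipA]
        rw [if_neg hmatch]
      have hstep : pvStepB (acc, some base) x = pvStepB (acc, none) x := by
        simp only [pvStepB]
        by_cases hB : PySem.Str.startswith x "B-" = true
        · simp only [hB, if_true]
        · have hB' : PySem.Str.startswith x "B-" = false := Bool.eq_false_iff.mpr hB
          have hI : (PySem.Str.startswith x "I-"
              && ((some base : Option String) == some (PySem.Str.slice x (some 2) none))) = false := by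
            rw [Bool.eq_false_iff]
            intro h
            apply hmatch
            simp only [Bool.and_eq_true, beq_iff_eq, Option.some.injEq] at h ⊢
            exact h
          have hI2 : (PySem.Str.startswith x "I-"
              && ((none : Option String) == some (PySem.Str.slice x (some 2) none))) = false := by
            simp
          rw [hB', hI, hI2]
          simp
      rw [hskip, List.foldl_cons, List.foldl_cons, hstep]

-- A's outer loop equals B's fold started with no active base
theorem loopA_eq_foldl (n : Nat) : ∀ (xs : List String), xs.length ≤ n →
    ∀ (acc : List String), pvLoopA acc xs = (List.foldl pvStepB (acc, none) xs).1 := by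
  induction n with
  | zero =>
    intro xs hlen acc
    have : xs = [] := List.eq_nil_of_length_eq_zero (Nat.le_zero.mp hlen)
    subst this
    simp [pvLoopA]
  | succ n ih =>
    intro xs hlen acc
    cases xs with
    | nil => simp [pvLoopA]
    | cons label rest =>
      simp only [List.length_cons, Nat.succ_le_succ_iff] at hlen
      by_cases hB : PySem.Str.startswith label "B-" = true
      · rw [pvLoopA, if_pos hB, List.foldl_cons]
        have hstep : pvStepB (acc, none) label
            = (acc ++ [PySem.Str.slice label (some 2) none],
               some (PySem.Str.slice label (some 2) none)) := by
          simp only [pvStepB]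
          rw [if_pos hB]
        rw [hstep, foldl_stepB_some]
        exact ih _ (le_trans (pvSkipA_length_le _ rest) hlen) _
      · rw [pvLoopA, if_neg hB, List.foldl_cons]
        have hstep : pvStepB (acc, none) label
            = (acc ++ [PySem.Str.slice label (some 2) none], none) := by
          simp only [pvStepB]
          rw [if_neg hB, if_neg (by simp)]
        rw [hstep]
        exact ih _ hlen _

-- ===== VERDICT (by name: the statement is the Claim_ definition above) =====
theorem combine_labels_spec : Claim_equal_combine_labels := by
  intro labels _
  unfold Spec_combine_labels combine_labels combine_labels_alt
  exact loopA_eq_foldl labels.length labels (le_refl _) []
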